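-- pv_equiv track=rewrite | github.com/dtg01100/batch-file-processor | core/utils/utils.py | _split_invoice_records
-- ===== SOURCE A (Python) =====
-- def _split_invoice_records(
--     invoice_lines: list[str],
-- ) -> tuple[str | None, list[str], str | None]:
--     """Split invoice lines into A, B, and C record collections."""
--     a_record = None
--     b_records = []
--     c_record = None
--
--     for line in invoice_lines:
--         if line.startswith("A"):
--             a_record = line
--         elif line.startswith("B"):
--             b_records.append(line)
--         elif line.startswith("C"):
--             c_record = line
--
--     return a_record, b_records, c_record
-- ===== SOURCE B (Python) =====
-- def _split_invoice_records(
--     invoice_lines: list[str],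
-- ) -> tuple[str | None, list[str], str | None]:
--     """Split invoice lines into A, B, and C record collections."""
--     a_lines = [line for line in invoice_lines if line.startswith("A")]
--     b_records = [line for line in invoice_lines if line.startswith("B")]
--     c_lines = [line for line in invoice_lines if line.startswith("C")]
--     return (
--         a_lines[-1] if a_lines else None,
--         b_records,
--         c_lines[-1] if c_lines else None,
--     )
-- ===== Notes on version B (the rewrite author's own statement) =====
-- stated objective: simpler
-- what changed: Replaces the single stateful categorizing loop with three independent filter passes ('keep matching lines, take the last' for A/C), removing the mutable accumulator state.
import Mathlib
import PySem

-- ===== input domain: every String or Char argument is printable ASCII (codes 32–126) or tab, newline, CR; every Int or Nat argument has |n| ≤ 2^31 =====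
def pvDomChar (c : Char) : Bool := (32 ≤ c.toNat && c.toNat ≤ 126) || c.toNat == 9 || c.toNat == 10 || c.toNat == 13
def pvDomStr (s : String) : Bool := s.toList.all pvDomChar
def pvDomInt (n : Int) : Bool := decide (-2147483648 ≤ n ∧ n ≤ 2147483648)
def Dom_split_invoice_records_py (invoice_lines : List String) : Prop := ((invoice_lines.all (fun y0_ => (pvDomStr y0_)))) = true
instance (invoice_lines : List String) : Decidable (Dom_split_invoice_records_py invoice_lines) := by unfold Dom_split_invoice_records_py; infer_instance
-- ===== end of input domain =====

-- B replaces A's single stateful categorizing loop with three independent filter passes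
-- ("keep matching lines, take the last" for A/C records): simpler, no mutable state.


-- ===== PORT A =====
-- the loop body of A: one branching step updating (a_record, b_records, c_record)
def pvStep (st : Option String × List String × Option String) (line : String) :
    Option String × List String × Option String :=
  if PySem.Str.startswith line "A" then (some line, st.2.1, st.2.2)
  else if PySem.Str.startswith line "B" then (st.1, st.2.1 ++ [line], st.2.2)
  else if PySem.Str.startswith line "C" then (st.1, st.2.1, some line)
  else st

def split_invoice_records_py (invoice_lines : List String) :
    Option String × List String × Option String :=
  invoice_lines.foldl pvStep (none, [], none)

-- ===== PORT B =====
def split_invoice_records_py_alt (invoice_lines : List String) :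
    Option String × List String × Option String :=
  let aLines := invoice_lines.filter (fun line => PySem.Str.startswith line "A")
  let bRecords := invoice_lines.filter (fun line => PySem.Str.startswith line "B")
  let cLines := invoice_lines.filter (fun line => PySem.Str.startswith line "C")
  (aLines.getLast?, bRecords, cLines.getLast?)

-- ===== PRECONDITION & SPEC =====
def Spec_split_invoice_records_py (invoice_lines : List String) (out : Option String × List String × Option String) : Prop := out = split_invoice_records_py_alt invoice_lines
instance (invoice_lines : List String) (out : Option String × List String × Option String) : Decidable (Spec_split_invoice_records_py invoice_lines out) := by unfold Spec_split_invoice_records_py; infer_instance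

-- ===== CLAIM (what is proved, stated in full; the proofs are below) =====
def Claim_equal_split_invoice_records_py : Prop := ∀ (invoice_lines : List String), Dom_split_invoice_records_py invoice_lines → Spec_split_invoice_records_py invoice_lines (split_invoice_records_py invoice_lines)

-- ===== LEMMAS AND PROOFS =====

-- a string starting with character a does not start with a different character b
theorem pv_sw_excl (s : String) (a b : Char) (hne : a ≠ b)
    (h : PySem.Chars.startswith s.toList [a] = true) :
    PySem.Chars.startswith s.toList [b] = false := by
  rw [PySem.Chars.startswith_iff] at h
  rcases h with ⟨t, ht⟩
  by_contra hb
  rw [Bool.not_eq_false, PySem.Chars.startswith_iff] at hb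
  rcases hb with ⟨t2, ht2⟩
  rw [← ht2] at ht
  simp at ht
  exact hne ht.1

theorem pv_sw_excl_str (s : String) (a b : Char) (hne : a ≠ b)
    (h : PySem.Str.startswith s (String.ofList [a]) = true) :
    PySem.Str.startswith s (String.ofList [b]) = false := by
  have ea : (String.ofList [a]).toList = [a] := by simp
  have eb : (String.ofList [b]).toList = [b] := by simp
  have h' : PySem.Chars.startswith s.toList [a] = true := by
    rw [← ea]; simpa using h
  have := pv_sw_excl s a b hne h'
  rw [PySem.Str.startswith_eq, eb]
  exact this

-- getLast? of a cons, expressed through the fallback accumulator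
theorem pv_lastor (l : String) (t : List String) (a : Option String) :
    ((l :: t).getLast?).or a = (t.getLast?).or (some l) := by
  cases t <;> simp [List.getLast?]

-- loop invariant: A's fold from any state equals B's three filters combined with the state
theorem pv_fold_char : ∀ (xs : List String) (a : Option String) (bs : List String) (c : Option String),
    xs.foldl pvStep (a, bs, c) =
      (((xs.filter (fun l => PySem.Str.startswith l "A")).getLast?).or a,
       bs ++ xs.filter (fun l => PySem.Str.startswith l "B"),
       ((xs.filter (fun l => PySem.Str.startswith l "C")).getLast?).or c) := by
  intro xs
  induction xs with
  | nil => intro a bs c; simp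
  | cons l t ih =>
    intro a bs c
    by_cases hA : PySem.Str.startswith l "A" = true
    · have hB : PySem.Str.startswith l "B" = false := pv_sw_excl_str l 'A' 'B' (by decide) hA
      have hC : PySem.Str.startswith l "C" = false := pv_sw_excl_str l 'A' 'C' (by decide) hA
      simp only [List.foldl_cons, pvStep, hA, if_true, List.filter_cons, hB, hC,
        Bool.false_eq_true, if_false, ih, pv_lastor]
    · by_cases hB : PySem.Str.startswith l "B" = true
      · have hC : PySem.Str.startswith l "C" = false := pv_sw_excl_str l 'B' 'C' (by decide) hB
        simp only [List.foldl_cons, pvStep, hA, hB, hC, if_true, Bool.false_eq_true,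
          if_false, List.filter_cons, ih]
        simp
      · by_cases hC : PySem.Str.startswith l "C" = true
        · simp only [List.foldl_cons, pvStep, hA, hB, hC, if_true, Bool.false_eq_true,
            if_false, List.filter_cons, ih, pv_lastor]
        · simp only [List.foldl_cons, pvStep, hA, hB, hC, Bool.false_eq_true,
            if_false, List.filter_cons, ih]

-- ===== VERDICT (by name: the statement is the Claim_ definition above) =====
theorem split_invoice_records_py_spec : Claim_equal_split_invoice_records_py := by
  intro xs _
  unfold Spec_split_invoice_records_py split_invoice_records_py split_invoice_records_py_alt
  rw [pv_fold_char]
  simp
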